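-- pv_equiv track=rewrite | github.com/pypi-data/pypi-mirror-137 | packages/cometa/cometa-0.1.69.tar.gz/cometa-0.1.69/simba/annotation/features.py | find_colums
-- ===== SOURCE A (Python) =====
-- def find_colums(columns,authorized_prefixes,name):
--     low_columns = [x.lower() for x in list(columns)]
--     correct = [False]*len(low_columns)
--     for term in authorized_prefixes:
--         term = term.lower()
--         for idx,cname in enumerate(low_columns):
--             if correct[idx]: continue
--             correct[idx]=cname.startswith(term)
--     ##Return all the correct indexs
--     indices = [idx for idx,corr in enumerate(correct) if corr]
--     if len(indices)==0:
--         raise KeyError("Impossible to find '"+name+"' column starting by one of: "+",".join(authorized_prefixes))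
--     return indices
-- ===== SOURCE B (Python) =====
-- def find_colums(columns, authorized_prefixes, name):
--     # Build a trie of the lowered prefixes: dict char -> subtrie, '' marks a terminal.
--     trie = {}
--     for term in authorized_prefixes:
--         node = trie
--         for ch in term.lower():
--             node = node.setdefault(ch, {})
--         node[''] = True
--
--     def matches(s):
--         node = trie
--         for ch in s:
--             if '' in node:
--                 return True
--             if ch not in node:
--                 return False
--             node = node[ch]
--         return '' in node
--
--     indices = [i for i, c in enumerate(columns) if matches(c.lower())]
--     if not indices:
--         raise KeyError("Impossible to find '"+name+"' column starting by one of: "+",".join(authorized_prefixes))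
--     return indices
-- ===== Notes on version B (the rewrite author's own statement) =====
-- stated objective: faster
-- what changed: Replaces A's prefix-major double loop over a mutable boolean flag array by building a trie of the lowered prefixes once and matching each column with a single trie walk that stops at the first terminal node, so per column work no longer scans every prefix.
import Mathlib
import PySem

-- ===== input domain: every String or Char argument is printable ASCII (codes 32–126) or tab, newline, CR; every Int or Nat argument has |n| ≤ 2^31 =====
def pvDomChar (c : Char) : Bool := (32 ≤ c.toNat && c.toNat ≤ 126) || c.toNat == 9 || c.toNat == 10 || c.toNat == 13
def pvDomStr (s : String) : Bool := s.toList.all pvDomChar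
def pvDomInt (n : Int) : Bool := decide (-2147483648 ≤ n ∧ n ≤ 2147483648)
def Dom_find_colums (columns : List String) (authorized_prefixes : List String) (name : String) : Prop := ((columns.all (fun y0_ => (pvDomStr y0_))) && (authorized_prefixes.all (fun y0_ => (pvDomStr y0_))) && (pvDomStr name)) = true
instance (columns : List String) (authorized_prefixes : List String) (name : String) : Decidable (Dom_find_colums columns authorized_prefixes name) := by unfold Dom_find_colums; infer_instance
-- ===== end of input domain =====

-- B replaces A's prefix-major double loop over a mutable boolean flag array by a trie built
-- once from the lowered prefixes, each column then matched by one trie walk.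
-- Equivalence of the RETURN value is proved on Pre_ (the inputs where A returns rather than raises).

-- ===== PORT A =====
-- the enumerate index is always nonnegative and in range, so getD/set via .toNat are
-- exact for Python's correct[idx] read/write here
def find_colums (columns : List String) (authorized_prefixes : List String) (name : String) : List Int :=
  let low_columns := columns.map PySem.Str.lower
  let correct : List Bool := List.replicate low_columns.length false
  let correct := authorized_prefixes.foldl (fun correct term =>
    let term := PySem.Str.lower term
    (PySem.List.enumerate low_columns).foldl (fun correct p =>
      if correct.getD p.1.toNat false then correct
      else correct.set p.1.toNat (PySem.Str.startswith p.2 term)) correct) correct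
  (PySem.List.enumerate correct).filterMap (fun p => if p.2 then some p.1 else none)

-- ===== PORT B =====
-- Source B's trie of dicts (char -> subtrie, '' marking a terminal) becomes a mutual inductive:
-- a node is a terminal flag plus an ordered child list (the association-list reading of the dict)
mutual
inductive PvTrie where
  | node : Bool → PvChildren → PvTrie
  deriving DecidableEq, Repr
inductive PvChildren where
  | nil : PvChildren
  | cons : Char → PvTrie → PvChildren → PvChildren
  deriving DecidableEq, Repr
end

-- fresh chain for the suffix of a prefix not yet in the trie (dict setdefault creating new nodes)
def pvFresh : List Char → PvTrie
  | [] => .node true .nil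
  | c :: rest => .node false (.cons c (pvFresh rest) .nil)

mutual
-- insert one lowered prefix (Source B's inner `for ch in term.lower(): node = node.setdefault(...)`)
def PvTrie.ins : PvTrie → List Char → PvTrie
  | .node _ cs, [] => .node true cs
  | .node b cs, c :: rest => .node b (PvChildren.ins cs c rest)
  termination_by _ l => (l.length, 0, (0:Nat))
def PvChildren.ins : PvChildren → Char → List Char → PvChildren
  | .nil, c, rest => .cons c (pvFresh rest) .nil
  | .cons d t cs, c, rest =>
    if d = c then .cons d (PvTrie.ins t rest) cs
    else .cons d t (PvChildren.ins cs c rest)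
  termination_by cs _ rest => (rest.length, 1, sizeOf cs)
end

def pvChildFind : PvChildren → Char → Option PvTrie
  | .nil, _ => none
  | .cons d t cs, c => if d = c then some t else pvChildFind cs c

-- Source B's matches(): walk the column, succeeding at the first terminal node
def PvTrie.matches : PvTrie → List Char → Bool
  | .node b _, [] => b
  | .node b cs, c :: rest =>
    if b then true
    else match pvChildFind cs c with
      | none => false
      | some t => t.matches rest

def find_colums_alt (columns : List String) (authorized_prefixes : List String) (name : String) : List Int :=
  let trie := authorized_prefixes.foldl
    (fun tr term => PvTrie.ins tr (PySem.Str.lower term).toList)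
    (PvTrie.node false PvChildren.nil)
  (PySem.List.enumerate columns).filterMap (fun p =>
    if PvTrie.matches trie (PySem.Str.lower p.2).toList then some p.1 else none)

-- ===== PRECONDITION & SPEC =====
-- Pre_ excludes exactly the inputs on which A raises KeyError: no column starts with any prefix
def Pre_find_colums (columns : List String) (authorized_prefixes : List String) (name : String) : Prop :=
  ∃ c ∈ columns, ∃ t ∈ authorized_prefixes,
    PySem.Str.startswith (PySem.Str.lower c) (PySem.Str.lower t) = true
instance (columns : List String) (authorized_prefixes : List String) (name : String) : Decidable (Pre_find_colums columns authorized_prefixes name) := by unfold Pre_find_colums; infer_instance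

def pvWitness_find_colums : List String × List String × String := (["Apple", "bat"], ["AP"], "name")

def Spec_find_colums (columns : List String) (authorized_prefixes : List String) (name : String) (out : List Int) : Prop := out = find_colums_alt columns authorized_prefixes name
instance (columns : List String) (authorized_prefixes : List String) (name : String) (out : List Int) : Decidable (Spec_find_colums columns authorized_prefixes name out) := by unfold Spec_find_colums; infer_instance

-- ===== CLAIM (what is proved, stated in full; the proofs are below) =====
def Claim_equal_find_colums : Prop := ∀ (columns : List String) (authorized_prefixes : List String) (name : String), Dom_find_colums columns authorized_prefixes name → Pre_find_colums columns authorized_prefixes name → Spec_find_colums columns authorized_prefixes name (find_colums columns authorized_prefixes name)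

-- ===== LEMMAS AND PROOFS =====

-- A's inner loop over enumerate(low), as a pure zipWith:
-- position s+k becomes corr[s+k] || f low[k], positions below s are untouched
theorem pvInner (f : String → Bool) (low : List String) :
    ∀ (s : Nat) (corr : List Bool), corr.length = s + low.length →
    (PySem.List.enumerate low (s : Int)).foldl (fun corr p =>
        if corr.getD p.1.toNat false then corr
        else corr.set p.1.toNat (f p.2)) corr
      = corr.take s ++ (corr.drop s).zipWith (fun b c => b || f c) low := by
  induction low with
  | nil =>
      intro s corr h
      simp only [List.length_nil, Nat.add_zero] at h
      simp [PySem.List.enumerate_nil, List.take_of_length_le h.le]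
  | cons c low ih =>
      intro s corr h
      have hs : s < corr.length := by simp at h; omega
      have hget : corr.getD s false = corr[s] := List.getD_eq_getElem corr false hs
      rw [PySem.List.enumerate_cons]
      simp only [List.foldl_cons, Int.toNat_natCast]
      have hset : (if corr.getD s false then corr else corr.set s (f c))
          = corr.set s (corr[s] || f c) := by
        rw [hget]
        by_cases hb : corr[s] = true
        · have h2 : corr.set s corr[s] = corr := List.set_getElem_self hs
          rw [hb] at h2
          simp [hb, h2]
        · simp [eq_false_of_ne_true hb]
      rw [hset, show (s : Int) + 1 = ((s + 1 : Nat) : Int) by push_cast; ring,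
        ih (s + 1) _ (by simp at h ⊢; omega)]
      have hT : (corr.take s).length = s := by simp; omega
      rw [List.set_eq_take_cons_drop _ hs,
        List.take_append, List.drop_append,
        List.drop_eq_getElem_cons hs, hT]
      simp [List.take_take, List.drop_eq_nil_of_le (hT.le.trans (Nat.le_succ s)),
        List.zipWith]

-- pvInner at start index 0 and matching lengths
theorem pvInner0 (f : String → Bool) (low : List String) (corr : List Bool)
    (h : corr.length = low.length) :
    (PySem.List.enumerate low 0).foldl (fun corr p =>
        if corr.getD p.1.toNat false then corr
        else corr.set p.1.toNat (f p.2)) corr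
      = corr.zipWith (fun b c => b || f c) low := by
  have h2 := pvInner f low 0 corr (by simpa using h)
  simpa using h2

-- zipWith that ignores its right argument is the identity on equal lengths
theorem pvZipFst : ∀ (corr : List Bool) (low : List String), corr.length = low.length →
    List.zipWith (fun b (_ : String) => b) corr low = corr := by
  intro corr
  induction corr with
  | nil => intro low h; simp
  | cons b corr ih =>
      intro low h
      cases low with
      | nil => simp at h
      | cons c low => simp at h; simp [List.zipWith, ih low h]

-- composition of two zipWith passes against the same right-hand list
theorem pvZipZip (f g : Bool → String → Bool) :
    ∀ (low : List String) (corr : List Bool),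
    (corr.zipWith f low).zipWith g low = corr.zipWith (fun b c => g (f b c) c) low := by
  intro low
  induction low with
  | nil => intro corr; simp
  | cons c low ih => intro corr; cases corr <;> simp [List.zipWith, ih]

-- A's whole double loop: folding the inner pass over the prefixes is one zipWith with `any`
theorem pvAll (low : List String) :
    ∀ (ps : List String) (corr : List Bool), corr.length = low.length →
    ps.foldl (fun corr term =>
        (PySem.List.enumerate low 0).foldl (fun corr p =>
          if corr.getD p.1.toNat false then corr
          else corr.set p.1.toNat (PySem.Str.startswith p.2 (PySem.Str.lower term))) corr) corr
      = corr.zipWith (fun b c =>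
          b || ps.any (fun t => PySem.Str.startswith c (PySem.Str.lower t))) low := by
  intro ps
  induction ps with
  | nil =>
      intro corr h
      simp only [List.foldl_nil, List.any_nil, Bool.or_false]
      exact (pvZipFst corr low h).symm
  | cons t ps ih =>
      intro corr h
      rw [List.foldl_cons,
        pvInner0 (fun c => PySem.Str.startswith c (PySem.Str.lower t)) low corr h,
        ih _ (by simp [List.length_zipWith]; omega), pvZipZip]
      simp [Bool.or_assoc]

-- the first pass started from an all-false array is a plain map
theorem pvZipRep (f : Bool → String → Bool) :
    ∀ (low : List String), (List.replicate low.length false).zipWith f low = low.map (f false) := by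
  intro low
  induction low with
  | nil => simp
  | cons c low ih => simp [List.replicate, ih]

-- enumerate commutes with map on the elements
theorem pvEnumMap {α β : Type} (f : α → β) :
    ∀ (xs : List α) (s : Int),
    PySem.List.enumerate (xs.map f) s = (PySem.List.enumerate xs s).map (fun p => (p.1, f p.2)) := by
  intro xs
  induction xs with
  | nil => intro s; simp [PySem.List.enumerate_nil]
  | cons x xs ih => intro s; simp [PySem.List.enumerate_cons, ih]

-- ---- trie semantics ----

-- a fresh chain matches exactly the extensions of its prefix
theorem pvMatchesFresh : ∀ (p s : List Char), (pvFresh p).matches s = true ↔ p <+: s := by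
  intro p
  induction p with
  | nil => intro s; cases s <;> simp [pvFresh, PvTrie.matches]
  | cons c p ih =>
      intro s
      cases s with
      | nil => simp [pvFresh, PvTrie.matches]
      | cons d s =>
          simp only [pvFresh, PvTrie.matches, if_neg Bool.false_ne_true, pvChildFind]
          by_cases h : c = d
          · subst h
            simp [ih, List.cons_prefix_cons]
          · simp [h, Ne.symm h, List.cons_prefix_cons]

-- an unrelated character's child is untouched by insertion
theorem pvFindInsNe : ∀ (cs : PvChildren) (c d : Char) (rest : List Char), d ≠ c →
    pvChildFind (PvChildren.ins cs c rest) d = pvChildFind cs d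
  | .nil, c, d, rest, h => by simp [PvChildren.ins, pvChildFind, Ne.symm h]
  | .cons e t cs, c, d, rest, h => by
      by_cases he : e = c
      · subst he; simp [PvChildren.ins, pvChildFind, Ne.symm h]
      · simp only [PvChildren.ins, if_neg he, pvChildFind]
        by_cases hd : e = d
        · simp [hd]
        · simp [hd, pvFindInsNe cs c d rest h]

-- the inserted character's child after insertion
theorem pvFindInsEq : ∀ (cs : PvChildren) (c : Char) (rest : List Char),
    pvChildFind (PvChildren.ins cs c rest) c
      = some (match pvChildFind cs c with
          | none => pvFresh rest
          | some t => PvTrie.ins t rest)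
  | .nil, c, rest => by simp [PvChildren.ins, pvChildFind]
  | .cons e t cs, c, rest => by
      by_cases he : e = c
      · subst he; simp [PvChildren.ins, pvChildFind]
      · simp [PvChildren.ins, he, pvChildFind, pvFindInsEq cs c rest]

-- inserting a prefix adds exactly its extensions to the matched set
theorem pvMatchesIns : ∀ (p : List Char) (tr : PvTrie) (s : List Char),
    (tr.ins p).matches s = true ↔ (tr.matches s = true ∨ p <+: s) := by
  intro p
  induction p with
  | nil =>
      intro tr s
      cases tr with
      | node b cs =>
          cases s with
          | nil => simp [PvTrie.ins, PvTrie.matches]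
          | cons d sr => cases b <;> simp [PvTrie.ins, PvTrie.matches]
  | cons c p ih =>
      intro tr s
      cases tr with
      | node b cs =>
          cases s with
          | nil => simp [PvTrie.ins, PvTrie.matches]
          | cons d sr =>
              simp only [PvTrie.ins, PvTrie.matches]
              cases b with
              | true => simp
              | false =>
                  simp only [if_neg Bool.false_ne_true, List.cons_prefix_cons]
                  by_cases h : c = d
                  · subst h
                    rw [pvFindInsEq]
                    cases hf : pvChildFind cs c with
                    | none => simp [hf, pvMatchesFresh]
                    | some t => simp [hf, ih]
                  · rw [pvFindInsNe cs c d p (Ne.symm h)]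
                    simp [h]

-- the folded trie of all prefixes matches s iff some prefix is a prefix of s
theorem pvMatchesFold : ∀ (ps : List String) (tr : PvTrie) (s : List Char),
    ((ps.foldl (fun tr term => tr.ins (PySem.Str.lower term).toList) tr).matches s = true)
      ↔ (tr.matches s = true ∨ ∃ t ∈ ps, (PySem.Str.lower t).toList <+: s) := by
  intro ps
  induction ps with
  | nil => intro tr s; simp
  | cons t ps ih =>
      intro tr s
      rw [List.foldl_cons, ih, pvMatchesIns]
      constructor
      · rintro (⟨h | h⟩ | ⟨u, hu, hp⟩)
        · exact Or.inl h
        · exact Or.inr ⟨t, by simp, h⟩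
        · exact Or.inr ⟨u, by simp [hu], hp⟩
      · rintro (h | ⟨u, hu, hp⟩)
        · exact Or.inl (Or.inl h)
        · rcases List.mem_cons.mp hu with rfl | hu
          · exact Or.inl (Or.inr hp)
          · exact Or.inr ⟨u, hu, hp⟩

-- the per-column bools agree: trie walk = any-startswith scan
theorem pvBoolEq (ps : List String) (c : String) :
    ((ps.foldl (fun tr term => PvTrie.ins tr (PySem.Str.lower term).toList)
        (PvTrie.node false PvChildren.nil)).matches (PySem.Str.lower c).toList)
      = ps.any (fun t => PySem.Str.startswith (PySem.Str.lower c) (PySem.Str.lower t)) := by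
  have hL : ∀ s, (PvTrie.node false PvChildren.nil).matches s = false := by
    intro s; cases s <;> simp [PvTrie.matches, pvChildFind]
  rw [Bool.eq_iff_iff, pvMatchesFold, hL, List.any_eq_true]
  simp only [Bool.false_eq_true, false_or]
  constructor
  · rintro ⟨t, ht, hp⟩
    exact ⟨t, ht, by rw [PySem.Str.startswith_eq]; exact (PySem.Chars.startswith_iff _ _).mpr hp⟩
  · rintro ⟨t, ht, hsw⟩
    rw [PySem.Str.startswith_eq] at hsw
    exact ⟨t, ht, (PySem.Chars.startswith_iff _ _).mp hsw⟩

-- ===== VERDICT (by name: the statement is the Claim_ definition above) =====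
theorem find_colums_spec : Claim_equal_find_colums := by
  intro columns authorized_prefixes name _ _
  unfold Spec_find_colums find_colums find_colums_alt
  simp only []
  rw [pvAll (columns.map PySem.Str.lower) authorized_prefixes _ (by simp),
    pvZipRep, List.map_map, pvEnumMap, List.filterMap_map]
  simp only [Function.comp]
  congr 1
  funext p
  rw [pvBoolEq]
  simp
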